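-- pv_equiv track=rewrite | github.com/hiKeytech/sparktool | apps/frontend/inline-pages2.py | merge_blocks
-- ===== SOURCE A (Python) =====
-- def merge_blocks(route_blocks, page_blocks):
--     """
--     Merge import blocks: deduplicate by module.
--     - @tanstack/react-router and zod* come from route (we need createFileRoute/z)
--     - Everything else: page version wins (it may import more symbols)
--     """
--     route_mod_to_text = {m: t for t, m in route_blocks}
--     page_mod_to_text  = {m: t for t, m in page_blocks}
--
--     # Ordered dedup
--     seen = {}
--     for t, m in route_blocks + page_blocks:
--         if m not in seen:
--             seen[m] = None
--
--     result = []
--     for mod in seen: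
--         if mod in ("@tanstack/react-router", "zod", "zod/v4"):
--             if mod in route_mod_to_text:
--                 result.append(route_mod_to_text[mod])
--         elif mod in page_mod_to_text:
--             result.append(page_mod_to_text[mod])
--         elif mod in route_mod_to_text:
--             result.append(route_mod_to_text[mod])
--     return result
-- ===== SOURCE B (Python) =====
-- SPECIAL = ("@tanstack/react-router", "zod", "zod/v4")
--
-- def merge_blocks(route_blocks, page_blocks):
--     result = {}
--     for t, m in route_blocks:
--         result[m] = t
--     for t, m in page_blocks:
--         if m in SPECIAL:
--             continue
--         result[m] = t
--     return list(result.values())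
-- ===== Notes on version B (the rewrite author's own statement) =====
-- stated objective: simpler
-- what changed: Replaces A's three helper structures (two module-to-text dicts plus an ordered 'seen' dict and a branchy selection loop) with a single ordered dict built in two overwrite passes - route pass, then page pass that skips the special modules - whose values list is the result.
import Mathlib
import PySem

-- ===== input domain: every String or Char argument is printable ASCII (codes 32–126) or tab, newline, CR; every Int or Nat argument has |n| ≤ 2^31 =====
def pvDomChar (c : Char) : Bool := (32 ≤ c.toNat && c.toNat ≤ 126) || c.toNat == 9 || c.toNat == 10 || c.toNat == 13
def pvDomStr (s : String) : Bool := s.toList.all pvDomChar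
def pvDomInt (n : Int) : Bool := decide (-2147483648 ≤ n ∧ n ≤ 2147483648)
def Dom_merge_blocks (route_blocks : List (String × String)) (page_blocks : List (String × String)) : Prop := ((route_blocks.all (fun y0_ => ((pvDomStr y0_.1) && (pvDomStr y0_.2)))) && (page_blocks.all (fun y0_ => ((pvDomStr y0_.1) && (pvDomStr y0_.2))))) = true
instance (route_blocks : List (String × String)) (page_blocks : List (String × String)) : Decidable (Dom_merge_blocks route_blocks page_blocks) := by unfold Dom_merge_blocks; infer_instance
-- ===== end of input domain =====

-- B builds one ordered dict in two overwrite passes (route, then page skipping the special modules)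
-- instead of A's two lookup dicts + ordered 'seen' dict + branchy selection loop; same O(n) cost, simpler.


-- membership in the tuple ("@tanstack/react-router", "zod", "zod/v4") (used by both Pythons)
def pvSpecial (m : String) : Bool := m == "@tanstack/react-router" || m == "zod" || m == "zod/v4"

-- ===== PORT A =====
def merge_blocks (route_blocks : List (String × String)) (page_blocks : List (String × String)) : List String :=
  let route_mod_to_text : PySem.Dict String String :=
    route_blocks.foldl (fun d p => d.insert p.2 p.1) PySem.Dict.empty
  let page_mod_to_text : PySem.Dict String String :=
    page_blocks.foldl (fun d p => d.insert p.2 p.1) PySem.Dict.empty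
  let seen : PySem.Dict String (Option Unit) :=
    (route_blocks ++ page_blocks).foldl
      (fun d p => if d.contains p.2 then d else d.insert p.2 none) PySem.Dict.empty
  seen.keys.foldl (fun result m =>
    if pvSpecial m then
      if route_mod_to_text.contains m then result ++ [route_mod_to_text.getD m ""] else result
    else if page_mod_to_text.contains m then result ++ [page_mod_to_text.getD m ""]
    else if route_mod_to_text.contains m then result ++ [route_mod_to_text.getD m ""]
    else result) []

-- ===== PORT B =====
def merge_blocks_alt (route_blocks : List (String × String)) (page_blocks : List (String × String)) : List String :=
  let pass1 : PySem.Dict String String :=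
    route_blocks.foldl (fun d p => d.insert p.2 p.1) PySem.Dict.empty
  let pass2 : PySem.Dict String String :=
    page_blocks.foldl (fun d p => if pvSpecial p.2 then d else d.insert p.2 p.1) pass1
  pass2.values

-- ===== PRECONDITION & SPEC =====
def Spec_merge_blocks (route_blocks : List (String × String)) (page_blocks : List (String × String)) (out : List String) : Prop := out = merge_blocks_alt route_blocks page_blocks
instance (route_blocks : List (String × String)) (page_blocks : List (String × String)) (out : List String) : Decidable (Spec_merge_blocks route_blocks page_blocks out) := by unfold Spec_merge_blocks; infer_instance

-- ===== CLAIM (what is proved, stated in full; the proofs are below) =====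
def Claim_equal_merge_blocks : Prop := ∀ (route_blocks : List (String × String)) (page_blocks : List (String × String)), Dom_merge_blocks route_blocks page_blocks → Spec_merge_blocks route_blocks page_blocks (merge_blocks route_blocks page_blocks)

-- ===== LEMMAS AND PROOFS =====

-- lookup in a dict built by an insert loop is the last matching value, falling back to the start dict
theorem get?_insfold (l : List (String × String)) (d : PySem.Dict String String) (m : String) :
    (l.foldl (fun d p => d.insert p.2 p.1) d).get? m
      = l.foldl (fun acc p => if p.2 = m then some p.1 else acc) (d.get? m) := by
  induction l generalizing d with
  | nil => rfl
  | cons p l ih =>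
      simp only [List.foldl_cons, ih]
      congr 1
      rw [PySem.Dict.get?_insert]
      by_cases h : p.2 = m
      · simp [h]
      · simp [h, Ne.symm h]

theorem foldl_last_orElse (l : List (String × String)) (m : String) (i : Option String) :
    l.foldl (fun acc p => if p.2 = m then some p.1 else acc) i
      = (l.foldl (fun acc p => if p.2 = m then some p.1 else acc) none).elim i some := by
  induction l generalizing i with
  | nil => rfl
  | cons p l ih =>
      simp only [List.foldl_cons]
      rw [ih, ih (if p.2 = m then some p.1 else none)]
      cases hx : l.foldl (fun acc p => if p.2 = m then some p.1 else acc) none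
      · by_cases h : p.2 = m <;> simp [h]
      · by_cases h : p.2 = m <;> simp [h]

-- keys of A's 'seen' loop: ordered dedup of the module names
theorem keys_seenfold (l : List (String × String)) (d : PySem.Dict String (Option Unit)) :
    (l.foldl (fun d p => if d.contains p.2 then d else d.insert p.2 none) d).keys
      = PySem.Set.update d.keys (l.map (·.2)) := by
  induction l generalizing d with
  | nil => rfl
  | cons p l ih =>
      simp only [List.foldl_cons, List.map_cons, PySem.Set.update_cons]
      by_cases h : d.contains p.2
      · rw [if_pos h, ih, PySem.Set.add_of_mem ((PySem.Dict.contains_iff_mem_keys _ _).mp h)]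
      · rw [if_neg h, ih, PySem.Dict.keys_insert_of_not_contains _ _ (by simpa using h),
          PySem.Set.add_of_not_mem (fun hm => h ((PySem.Dict.contains_iff_mem_keys _ _).mpr hm))]

theorem keys_insert_eq_add (d : PySem.Dict String String) (k : String) (v : String) :
    (d.insert k v).keys = PySem.Set.add d.keys k := by
  by_cases h : d.contains k
  · rw [PySem.Dict.keys_insert_of_contains _ _ h,
      PySem.Set.add_of_mem ((PySem.Dict.contains_iff_mem_keys _ _).mp h)]
  · rw [PySem.Dict.keys_insert_of_not_contains _ _ (by simpa using h),
      PySem.Set.add_of_not_mem (fun hm => h ((PySem.Dict.contains_iff_mem_keys _ _).mpr hm))]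

-- keys of B's page pass: the non-special page modules are folded in
theorem keys_bfold (l : List (String × String)) (d : PySem.Dict String String) :
    (l.foldl (fun d p => if pvSpecial p.2 then d else d.insert p.2 p.1) d).keys
      = PySem.Set.update d.keys ((l.filter (fun p => !pvSpecial p.2)).map (·.2)) := by
  induction l generalizing d with
  | nil => rfl
  | cons p l ih =>
      by_cases h : pvSpecial p.2
      · simp only [List.foldl_cons, List.filter_cons, ih]
        simp [h]
      · simp only [List.foldl_cons, if_neg h, List.filter_cons, ih, keys_insert_eq_add]
        simp [h, PySem.Set.update_cons]

-- lookup after B's page pass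
theorem get?_bfold (l : List (String × String)) (d : PySem.Dict String String) (m : String) :
    (l.foldl (fun d p => if pvSpecial p.2 then d else d.insert p.2 p.1) d).get? m
      = if pvSpecial m then d.get? m
        else l.foldl (fun acc p => if p.2 = m then some p.1 else acc) (d.get? m) := by
  induction l generalizing d with
  | nil => by_cases h : pvSpecial m <;> simp [h]
  | cons p l ih =>
      simp only [List.foldl_cons]
      by_cases hp : pvSpecial p.2
      · rw [if_pos hp, ih]
        by_cases hm : pvSpecial m
        · simp [hm]
        · have : p.2 ≠ m := fun e => hm (e ▸ hp)
          simp [hm, this]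
      · rw [if_neg hp, ih]
        by_cases hm : pvSpecial m
        · have : ¬ (m = p.2) := fun e => hp (e ▸ hm)
          rw [if_pos hm, if_pos hm, PySem.Dict.get?_insert, if_neg this]
        · rw [if_neg hm, if_neg hm, PySem.Dict.get?_insert]
          by_cases h2 : p.2 = m
          · simp [h2]
          · simp [h2, Ne.symm h2]

-- the order lemma: updating with the filtered page modules = updating with all of them, then filtering
theorem update_filter_eq_filter_update (keep : String → Bool)
    (H0 : ∀ m, pvSpecial m = false → keep m = true) :
    ∀ (qs : List String) (s : List String),
      (∀ m, pvSpecial m = true → keep m = true → m ∈ s) →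
      PySem.Set.update (s.filter keep) (qs.filter (fun m => !pvSpecial m))
        = (PySem.Set.update s qs).filter keep := by
  intro qs
  induction qs with
  | nil =>
      intro s _; rfl
  | cons q qs ih =>
      intro s H2
      simp only [List.filter_cons, PySem.Set.update_cons]
      by_cases hq : pvSpecial q
      · simp only [hq, Bool.not_true, Bool.false_eq_true, if_false]
        by_cases hk : keep q
        · have hqs : q ∈ s := H2 q hq hk
          rw [PySem.Set.add_of_mem hqs]
          exact ih s H2
        · by_cases hmem : q ∈ s
          · rw [PySem.Set.add_of_mem hmem]; exact ih s H2
          · rw [PySem.Set.add_of_not_mem hmem]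
            have hfil : (s ++ [q]).filter keep = s.filter keep := by
              simp [List.filter_append, hk]
            rw [← hfil]
            exact ih (s ++ [q]) (fun m h1 h2 => List.mem_append_left _ (H2 m h1 h2))
      · simp only [hq, Bool.not_false, if_pos, PySem.Set.update_cons]
        have hk : keep q = true := H0 q (by simpa using hq)
        have hadd : PySem.Set.add (s.filter keep) q = (PySem.Set.add s q).filter keep := by
          by_cases hmem : q ∈ s
          · rw [PySem.Set.add_of_mem hmem, PySem.Set.add_of_mem (List.mem_filter.mpr ⟨hmem, hk⟩)]
          · rw [PySem.Set.add_of_not_mem hmem,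
              PySem.Set.add_of_not_mem (fun h => hmem (List.mem_filter.mp h).1)]
            simp [List.filter_append, hk]
        rw [hadd]
        exact ih (PySem.Set.add s q)
          (fun m h1 h2 => (PySem.Set.mem_add _ _ _).mpr (Or.inl (H2 m h1 h2)))

-- a flatMap whose pieces are singletons exactly on 'keep' is a filter-then-map
theorem flatMap_eq_filter_map {α β : Type} (f : α → List β) (keep : α → Bool) (g : α → β)
    (l : List α) (h : ∀ m ∈ l, f m = if keep m then [g m] else []) :
    l.flatMap f = (l.filter keep).map g := by
  induction l with
  | nil => rfl
  | cons x l ih =>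
      simp only [List.flatMap_cons, List.filter_cons,
        h x (List.mem_cons_self), ih (fun m hm => h m (List.mem_cons_of_mem _ hm))]
      by_cases hx : keep x <;> simp [hx]

-- the selection A makes for one module, as a list piece
def pvChoice (rd pd : PySem.Dict String String) (m : String) : List String :=
  if pvSpecial m then
    if rd.contains m then [rd.getD m ""] else []
  else if pd.contains m then [pd.getD m ""]
  else if rd.contains m then [rd.getD m ""]
  else []

theorem main_eq (R P : List (String × String)) :
    merge_blocks R P = merge_blocks_alt R P := by
  simp only [merge_blocks, merge_blocks_alt]
  set rd := R.foldl (fun d p => d.insert p.2 p.1) PySem.Dict.empty with hrd_def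
  set pd := P.foldl (fun d p => d.insert p.2 p.1) PySem.Dict.empty with hpd_def
  set d2 := P.foldl (fun d p => if pvSpecial p.2 then d else d.insert p.2 p.1) rd with hd2_def
  set seen := (R ++ P).foldl
      (fun d p => if d.contains p.2 then d else d.insert p.2 none) (PySem.Dict.empty (ν := Option Unit)) with hseen_def
  set rs := R.map (fun p => p.2) with hrs_def
  set qs := P.map (fun p => p.2) with hqs_def
  set keep : String → Bool := fun m => !pvSpecial m || decide (m ∈ rs) with hkeep_def
  -- keys of the dicts
  have hrdk : rd.keys = PySem.Set.ofList rs := by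
    rw [hrd_def, PySem.Dict.keys_foldl_insert_key R (fun p => p.2) (fun _ p => p.1)]
    simp only [PySem.Dict.keys_empty, PySem.Set.update_nil_left, hrs_def]
  have hpdk : pd.keys = PySem.Set.ofList qs := by
    rw [hpd_def, PySem.Dict.keys_foldl_insert_key P (fun p => p.2) (fun _ p => p.1)]
    simp only [PySem.Dict.keys_empty, PySem.Set.update_nil_left, hqs_def]
  have hseenk : seen.keys = PySem.Set.update (PySem.Set.ofList rs) qs := by
    rw [hseen_def, keys_seenfold]
    simp only [PySem.Dict.keys_empty, PySem.Set.update_nil_left, List.map_append,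
      PySem.Set.ofList_append, hrs_def, hqs_def]
  have hd2k : d2.keys = PySem.Set.update (PySem.Set.ofList rs)
      (qs.filter (fun m => !pvSpecial m)) := by
    rw [hd2_def, keys_bfold, hrdk]
    congr 1
    rw [hqs_def, List.filter_map]
    rfl
  -- contains facts
  have hrdc : ∀ m, rd.contains m = true ↔ m ∈ rs := by
    intro m; rw [PySem.Dict.contains_iff_mem_keys, hrdk, PySem.Set.mem_ofList]
  have hpdc : ∀ m, pd.contains m = true ↔ m ∈ qs := by
    intro m; rw [PySem.Dict.contains_iff_mem_keys, hpdk, PySem.Set.mem_ofList]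
  -- d2's keys are seen's keys filtered by 'keep'
  have hd2k' : d2.keys = seen.keys.filter keep := by
    rw [hd2k, hseenk]
    have hfil : (PySem.Set.ofList rs).filter keep = PySem.Set.ofList rs := by
      apply List.filter_eq_self.mpr
      intro m hm
      have : m ∈ rs := (PySem.Set.mem_ofList _ _).mp hm
      simp [hkeep_def, this]
    conv_lhs => rw [← hfil]
    exact update_filter_eq_filter_update keep
      (by intro m hm; simp [hkeep_def, hm]) qs (PySem.Set.ofList rs)
      (fun m hsp hk => by
        rw [PySem.Set.mem_ofList]
        rcases Bool.or_eq_true_iff.mp (by rw [hkeep_def] at hk; exact hk) with h1 | h2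
        · exact absurd hsp (by simpa using h1)
        · exact of_decide_eq_true h2)
  have hnod : d2.keys.Nodup := by
    rw [hd2k]; exact PySem.Set.nodup_update _ _ (PySem.Set.nodup_ofList rs)
  -- B is a map over d2's keys
  rw [PySem.Dict.values_eq_map_keys d2 hnod ""]
  -- A is a flatMap over seen's keys
  have hbody : (seen.keys.foldl (fun result m =>
      if pvSpecial m then
        if rd.contains m then result ++ [rd.getD m ""] else result
      else if pd.contains m then result ++ [pd.getD m ""]
      else if rd.contains m then result ++ [rd.getD m ""]
      else result) []) = seen.keys.flatMap (pvChoice rd pd) := by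
    have : (fun (result : List String) m =>
        if pvSpecial m then
          if rd.contains m then result ++ [rd.getD m ""] else result
        else if pd.contains m then result ++ [pd.getD m ""]
        else if rd.contains m then result ++ [rd.getD m ""]
        else result) = fun result m => result ++ pvChoice rd pd m := by
      funext result m
      unfold pvChoice
      split_ifs <;> simp
    rw [this, PySem.List.foldl_append_eq_flatMap]
    rfl
  rw [hbody, hd2k']
  -- pointwise: A's choice is a 'keep'-guarded singleton of d2's value
  apply flatMap_eq_filter_map (pvChoice rd pd) keep (fun m => d2.getD m "")
  intro m hm
  have hmem : m ∈ rs ∨ m ∈ qs := by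
    rw [hseenk] at hm
    rcases (PySem.Set.mem_update _ _ _).mp hm with h | h
    · exact Or.inl ((PySem.Set.mem_ofList _ _).mp h)
    · exact Or.inr h
  have hrdg : rd.get? m = R.foldl (fun acc p => if p.2 = m then some p.1 else acc) none := by
    rw [hrd_def, get?_insfold]; rfl
  have hpdg : pd.get? m = P.foldl (fun acc p => if p.2 = m then some p.1 else acc) none := by
    rw [hpd_def, get?_insfold]; rfl
  have hd2g : d2.get? m = if pvSpecial m then rd.get? m
      else (pd.get? m).elim (rd.get? m) some := by
    rw [hd2_def, get?_bfold]
    by_cases hs : pvSpecial m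
    · simp [hs]
    · rw [if_neg hs, if_neg hs, hpdg, ← foldl_last_orElse]
  unfold pvChoice
  by_cases hs : pvSpecial m
  · rw [if_pos hs]
    have hkm : keep m = decide (m ∈ rs) := by simp [hkeep_def, hs]
    by_cases hin : m ∈ rs
    · rw [if_pos ((hrdc m).mpr hin), hkm, if_pos (by simpa using hin)]
      rw [PySem.Dict.getD_eq_get?_getD, PySem.Dict.getD_eq_get?_getD, hd2g, if_pos hs]
    · rw [if_neg (fun h => hin ((hrdc m).mp h)), hkm, if_neg (by simpa using hin)]
  · rw [if_neg hs]
    have hkm : keep m = true := by simp [hkeep_def, hs]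
    rw [hkm, if_pos rfl]
    by_cases hp : pd.contains m
    · rw [if_pos hp]
      have : d2.get? m = pd.get? m := by
        rw [hd2g, if_neg hs]
        rcases Option.isSome_iff_exists.mp (by rw [← PySem.Dict.contains_eq_isSome_get? pd m]; exact hp) with ⟨v, hv⟩
        rw [hv]; rfl
      rw [PySem.Dict.getD_eq_get?_getD, PySem.Dict.getD_eq_get?_getD, this]
    · rw [if_neg hp]
      have hpnone : pd.get? m = none := by
        cases hx : pd.get? m with
        | none => rfl
        | some v => exact absurd (by rw [PySem.Dict.contains_eq_isSome_get?, hx]; rfl) hp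
      have hd2rd : d2.get? m = rd.get? m := by rw [hd2g, if_neg hs, hpnone]; rfl
      by_cases hr : rd.contains m
      · rw [if_pos hr, PySem.Dict.getD_eq_get?_getD, PySem.Dict.getD_eq_get?_getD, hd2rd]
      · exfalso
        rcases hmem with h | h
        · exact hr ((hrdc m).mpr h)
        · exact hp ((hpdc m).mpr h)

-- ===== VERDICT (by name: the statement is the Claim_ definition above) =====
theorem merge_blocks_spec : Claim_equal_merge_blocks := by
  intro R P _
  unfold Spec_merge_blocks
  exact main_eq R P
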